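-- pv_equiv track=rewrite | github.com/rsprenkels/kattis | python/1_5/drmmessages.py | drmmessage
-- ===== SOURCE A (Python) =====
-- def rotation_value(text):
--     return sum([ord(c) - ord('A') for c in text])
--
-- def rot_char(c, amount):
--     return chr((((ord(c) - ord('A')) + amount) % 26) + ord('A'))
--
-- def rotate(text, amount):
--     return ''.join([rot_char(c, amount) for c in text])
--
-- def drmmessage(cipher):
--     first_half = cipher[:len(cipher) // 2]
--     second_half = cipher[len(cipher) // 2:]
--     first_rotated = rotate(first_half, rotation_value(first_half))
--     second_rotated = rotate(second_half, rotation_value(second_half))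
--     result = []
--     for index, c in enumerate(first_rotated):
--         result.append(rotate(c, rotation_value(second_rotated[index])))
--     return ''.join(result)
-- ===== SOURCE B (Python) =====
-- def drmmessage(cipher):
--     n = len(cipher) // 2
--     r = sum(ord(c) - 65 for c in cipher)
--     return ''.join(chr((ord(a) + ord(b) - 130 + r) % 26 + 65)
--                    for a, b in zip(cipher[:n], cipher[n:]))
-- ===== Notes on version B (the rewrite author's own statement) =====
-- stated objective: simpler
-- what changed: B collapses A's three rotation passes (rotate each half by its own rotation value, then re-rotate the first half char-by-char via the second rotated half) into one total rotation sum and a single zip loop with one modular formula, never building the intermediate rotated strings.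
import Mathlib
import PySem

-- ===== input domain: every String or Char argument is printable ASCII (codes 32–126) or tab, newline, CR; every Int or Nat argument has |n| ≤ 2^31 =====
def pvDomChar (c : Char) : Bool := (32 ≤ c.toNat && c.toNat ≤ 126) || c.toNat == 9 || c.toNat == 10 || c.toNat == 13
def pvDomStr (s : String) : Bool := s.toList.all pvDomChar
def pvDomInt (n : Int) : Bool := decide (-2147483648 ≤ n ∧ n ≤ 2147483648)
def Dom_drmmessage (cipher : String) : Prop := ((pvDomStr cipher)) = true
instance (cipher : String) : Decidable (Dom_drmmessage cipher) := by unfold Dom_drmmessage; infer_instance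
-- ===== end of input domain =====

-- B replaces A's three rotation passes (rotate each half by its own rotation value, then
-- re-rotate the first rotated half char-by-char by the second rotated half's chars) with a
-- single total rotation sum and one zip pass using one modular formula (objective: simpler).

-- ===== PORT A =====
def pvRotationValue (text : List Char) : Int :=
  (text.map (fun c => (c.toNat : Int) - 65)).sum

def pvRotChar (c : Char) (amount : Int) : Char :=
  Char.ofNat ((PySem.Int.mod (((c.toNat : Int) - 65) + amount) 26).toNat + 65)

def pvRotate (text : List Char) (amount : Int) : List Char :=
  text.map (fun c => pvRotChar c amount)

def drmmessage (cipher : String) : String :=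
  let cs := cipher.toList
  let firstHalf := PySem.List.slice cs none (some (PySem.Int.floordiv (cs.length : Int) 2))
  let secondHalf := PySem.List.slice cs (some (PySem.Int.floordiv (cs.length : Int) 2)) none
  let firstRotated := pvRotate firstHalf (pvRotationValue firstHalf)
  let secondRotated := pvRotate secondHalf (pvRotationValue secondHalf)
  let result := (PySem.List.enumerate firstRotated).foldl
    (fun acc p =>
      acc ++ pvRotate [p.2] (pvRotationValue [((PySem.List.pyGet? secondRotated p.1).getD 'A')]))
    []
  String.mk result

-- ===== PORT B =====
def drmmessage_alt (cipher : String) : String :=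
  let cs := cipher.toList
  let n := cs.length / 2
  let r : Int := (cs.map (fun c => (c.toNat : Int) - 65)).sum
  String.mk (((cs.take n).zip (cs.drop n)).map
    (fun p => Char.ofNat ((PySem.Int.mod ((p.1.toNat : Int) + (p.2.toNat : Int) - 130 + r) 26).toNat + 65)))

-- ===== PRECONDITION & SPEC =====
def Spec_drmmessage (cipher : String) (out : String) : Prop := out = drmmessage_alt cipher
instance (cipher : String) (out : String) : Decidable (Spec_drmmessage cipher out) := by unfold Spec_drmmessage; infer_instance

-- ===== CLAIM (what is proved, stated in full; the proofs are below) =====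
def Claim_equal_drmmessage : Prop := ∀ (cipher : String), Dom_drmmessage cipher → Spec_drmmessage cipher (drmmessage cipher)

-- ===== LEMMAS AND PROOFS =====

-- one combined char: A's double rotation equals B's single modular formula
lemma pv_rot_combine (x y : Char) (r1 r2 : Int) :
    pvRotChar (pvRotChar x r1) (pvRotationValue [pvRotChar y r2])
      = Char.ofNat ((PySem.Int.mod ((x.toNat : Int) + (y.toNat : Int) - 130 + (r1 + r2)) 26).toNat + 65) := by
  simp only [pvRotChar, pvRotationValue, List.map, List.sum_cons, List.sum_nil,
    PySem.Int.mod_eq_emod_of_pos (show (0:Int) < 26 by norm_num)]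
  have hx : 0 ≤ ((x.toNat : Int) - 65 + r1) % 26 ∧ ((x.toNat : Int) - 65 + r1) % 26 < 26 :=
    ⟨Int.emod_nonneg _ (by norm_num), Int.emod_lt_of_pos _ (by norm_num)⟩
  have hy : 0 ≤ ((y.toNat : Int) - 65 + r2) % 26 ∧ ((y.toNat : Int) - 65 + r2) % 26 < 26 :=
    ⟨Int.emod_nonneg _ (by norm_num), Int.emod_lt_of_pos _ (by norm_num)⟩
  set a := ((x.toNat : Int) - 65 + r1) % 26 with ha
  set b := ((y.toNat : Int) - 65 + r2) % 26 with hb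
  have hva : (a.toNat + 65).isValidChar := Or.inl (by omega)
  have hvb : (b.toNat + 65).isValidChar := Or.inl (by omega)
  rw [Char.toNat_ofNat, Char.toNat_ofNat, if_pos hva, if_pos hvb]
  congr 2
  have h1 : ((a.toNat + 65 : Nat) : Int) - 65 + (((b.toNat + 65 : Nat) : Int) - 65 + 0) = a + b := by
    push_cast [Int.toNat_of_nonneg hx.1, Int.toNat_of_nonneg hy.1]; ring
  rw [h1, ha, hb]
  omega

-- enumerate with index lookup = zip (generalized over an already-consumed prefix)
lemma pv_enum_zip {β : Type} (g : Char → Char → β) :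
    ∀ (f pre s : List Char), f.length ≤ s.length →
      (PySem.List.enumerate f (pre.length : Int)).map
          (fun p => g p.2 ((PySem.List.pyGet? (pre ++ s) p.1).getD 'A'))
        = (f.zip s).map (fun p => g p.1 p.2) := by
  intro f
  induction f with
  | nil => intro pre s _; simp [PySem.List.enumerate]
  | cons a f ih =>
    intro pre s hlen
    match s with
    | [] => simp at hlen
    | b :: s' =>
      rw [PySem.List.enumerate_cons]
      simp only [List.map_cons, List.zip_cons_cons]
      congr 1
      · rw [PySem.List.pyGet?_natCast]
        simp
      · have hcast : ((pre.length : Int) + 1) = (((pre ++ [b]).length : Nat) : Int) := by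
          simp
        have happ : pre ++ b :: s' = (pre ++ [b]) ++ s' := by simp
        rw [hcast, happ]
        exact ih (pre ++ [b]) s' (by simpa using Nat.le_of_succ_le_succ hlen)

-- ===== VERDICT (by name: the statement is the Claim_ definition above) =====
theorem drmmessage_spec : Claim_equal_drmmessage := by
  intro cipher _
  unfold Spec_drmmessage drmmessage drmmessage_alt
  simp only []
  set cs := cipher.toList with hcs
  have hfd : PySem.Int.floordiv (cs.length : Int) 2 = ((cs.length / 2 : Nat) : Int) := by
    exact_mod_cast PySem.Int.floordiv_natCast cs.length 2
  rw [hfd, PySem.List.slice_to_natCast, PySem.List.slice_from_natCast]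
  set n := cs.length / 2 with hn
  set f := cs.take n with hf
  set s := cs.drop n with hs
  set r1 := pvRotationValue f with hr1
  set r2 := pvRotationValue s with hr2
  have hlen : f.length ≤ s.length := by
    simp [hf, hs]; omega
  -- loop body appends one char: rewrite to foldl-append-singleton, then to map
  have hsingle : (fun (acc : List Char) (p : Int × Char) =>
        acc ++ pvRotate [p.2] (pvRotationValue [((PySem.List.pyGet? (pvRotate s r2) p.1).getD 'A')]))
      = fun acc p => acc ++ [pvRotChar p.2 (pvRotationValue [((PySem.List.pyGet? (pvRotate s r2) p.1).getD 'A')])] := by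
    funext acc p; simp [pvRotate]
  rw [hsingle, PySem.List.foldl_append_singleton_eq_map, List.nil_append]
  -- enumerate + index lookup = zip
  have hez := pv_enum_zip (fun c1 c2 => pvRotChar c1 (pvRotationValue [c2]))
    (pvRotate f r1) [] (pvRotate s r2) (by simpa [pvRotate] using hlen)
  simp only [List.nil_append, List.length_nil, Nat.cast_zero] at hez
  rw [hez]
  -- zip of maps = map over zip, then pointwise arithmetic
  simp only [pvRotate, List.zip_map, List.map_map]
  refine congrArg String.mk (List.map_congr_left ?_)
  intro p _
  simp only [Function.comp, Prod.map]
  have hr : r1 + r2 = (cs.map (fun c => (c.toNat : Int) - 65)).sum := by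
    rw [hr1, hr2, hf, hs]
    simp [pvRotationValue]
  rw [pv_rot_combine, hr]
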